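-- pv_equiv track=rewrite | github.com/denskiy/python-for-dqe | functions_home_task.py | resulting_dictionary
-- ===== SOURCE A (Python) =====
-- def resulting_dictionary(l: list):
--
--     # create a dictionary that will store tuples containing all necessary information for every unique key
--     max_dict = {}
--
--     i = 1 # this var will store a number of dictionary from the list
--     for dict in l: # loop through dictionaries
--         for key, value in dict.items(): # loop through keys & values of dictionaries
--             if not max_dict.get(key): # if the key is not already stored in max_dict
--                 max_dict.update({key: (1, value, i)}) # we add it with count=1, value & number of dictionary
--             else: # if the key is already stored in max_dict
--                 count, max_value, value_index = max_dict[key] # we get the values from corresponding key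
--                 count += 1 # increase a counter value
--                 max_dict[key] = (count, max_value, value_index) # update only the count value for the key
--                 if max_dict[key][1] < value: # and if the value is bigger then current one
--                     max_dict[key] = (count, value, i) # also update the value and the index number
--         i += 1
--
--     # create another dictionary that will store the final results
--     result = {}
--     for key, (count, max_value, value_index) in max_dict.items(): # loop through items of max_dict dictionary
--         if count == 1: # if key is only in one dict
--             result.update({key: max_value}) # we take the key as is and the value
--         else: # if key is in multiple dictionaries
--             result.update({f'{key}_{value_index}': max_value}) # we generate the new key using value_index
--
--     return result
-- ===== SOURCE B (Python) =====
-- from collections import defaultdict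
--
--
-- def resulting_dictionary(l: list):
--     # Phase 1: collect, for each key, all (value, dict-number) occurrences.
--     occ = defaultdict(list)
--     for i, d in enumerate(l, 1):
--         for key, value in d.items():
--             occ[key].append((value, i))
--     # Phase 2: reduce each occurrence list to its maximum (earliest on ties).
--     result = {}
--     for key, pairs in occ.items():
--         max_value, max_idx = max(pairs, key=lambda p: p[0])
--         if len(pairs) == 1:
--             result[key] = max_value
--         else:
--             result[f'{key}_{max_idx}'] = max_value
--     return result
-- ===== Notes on version B (the rewrite author's own statement) =====
-- stated objective: simpler
-- what changed: B replaces A's inline running-(count,max,index) tuple updates with a collect-then-reduce structure: phase 1 groups all (value, dict-number) occurrences per key in a defaultdict(list), phase 2 reduces each group once with max(pairs, key=p[0]) (first maximal element keeps the earliest index, matching A's strict '<').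
import Mathlib
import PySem

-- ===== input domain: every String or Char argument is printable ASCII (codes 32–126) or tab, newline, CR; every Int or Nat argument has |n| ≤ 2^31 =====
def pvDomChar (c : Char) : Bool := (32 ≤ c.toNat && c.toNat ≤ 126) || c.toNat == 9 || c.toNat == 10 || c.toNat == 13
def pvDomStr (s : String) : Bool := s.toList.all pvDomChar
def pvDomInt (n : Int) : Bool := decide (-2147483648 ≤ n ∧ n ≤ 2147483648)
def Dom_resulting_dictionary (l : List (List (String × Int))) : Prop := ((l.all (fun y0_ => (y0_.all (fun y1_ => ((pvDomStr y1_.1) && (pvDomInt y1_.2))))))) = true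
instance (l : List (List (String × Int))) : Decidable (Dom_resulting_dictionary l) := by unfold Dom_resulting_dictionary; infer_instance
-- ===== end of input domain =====

-- B rebuilds the result by first grouping all (value, dict-number) occurrences per key
-- and then reducing each group once; objective: simpler collect-then-reduce structure.
-- Each inner List (String × Int) stands for a Python dict and is read through
-- PySem.Dict.ofList, exactly as Python's dict construction collapses duplicate keys.

-- ===== PORT A =====
-- inner loop body of A: the running (count, max_value, value_index) update for one key/value
def pvInnerA (i : Int) (md : PySem.Dict String (Int × Int × Int)) (kv : String × Int) :
    PySem.Dict String (Int × Int × Int) :=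
  match md.get? kv.1 with
  | none => md.insert kv.1 (1, kv.2, i)          -- max_dict.update({key: (1, value, i)})
  | some t =>                                     -- (count, max_value, value_index)
    let md1 := md.insert kv.1 (t.1 + 1, t.2.1, t.2.2)
    let t1 := (md1.get? kv.1).getD (0, 0, 0)      -- max_dict[key]; the key is present, default unreachable
    if t1.2.1 < kv.2 then md1.insert kv.1 (t.1 + 1, kv.2, i) else md1

-- second loop body of A: building `result` from one item of max_dict
def pvResA (r : PySem.Dict String Int) (it : String × Int × Int × Int) : PySem.Dict String Int :=
  if it.2.1 == 1 then r.insert it.1 it.2.2.1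
  else r.insert (it.1 ++ "_" ++ PySem.Int.toStr it.2.2.2) it.2.2.1

def resulting_dictionary (l : List (List (String × Int))) : List (String × Int) :=
  let st := l.foldl
    (fun (st : PySem.Dict String (Int × Int × Int) × Int) d =>
      ((PySem.Dict.ofList d).items.foldl (pvInnerA st.2) st.1, st.2 + 1))
    (PySem.Dict.empty, 1)
  (st.1.items.foldl pvResA PySem.Dict.empty).items

-- ===== PORT B =====
-- phase-2 body of B: reduce one occurrence list with max(pairs, key=lambda p: p[0])
def pvResB (r : PySem.Dict String Int) (it : String × List (Int × Int)) : PySem.Dict String Int :=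
  match PySem.List.max? it.2 (fun q => q.1) with
  | some q =>
    if it.2.length == 1 then r.insert it.1 q.1
    else r.insert (it.1 ++ "_" ++ PySem.Int.toStr q.2) q.1
  | none => r    -- unreachable: every stored occurrence list is nonempty

def resulting_dictionary_alt (l : List (List (String × Int))) : List (String × Int) :=
  let occ := (PySem.List.enumerate l 1).foldl
    (fun (occ : PySem.Dict String (List (Int × Int))) p =>
      (PySem.Dict.ofList p.2).items.foldl
        (fun occ kv => occ.modify kv.1 [] (· ++ [(kv.2, p.1)])) occ)
    PySem.Dict.empty
  (occ.items.foldl pvResB PySem.Dict.empty).items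

-- ===== PRECONDITION & SPEC =====
def Spec_resulting_dictionary (l : List (List (String × Int))) (out : List (String × Int)) : Prop := out = resulting_dictionary_alt l
instance (l : List (List (String × Int))) (out : List (String × Int)) : Decidable (Spec_resulting_dictionary l out) := by unfold Spec_resulting_dictionary; infer_instance

-- ===== CLAIM (what is proved, stated in full; the proofs are below) =====
def Claim_equal_resulting_dictionary : Prop := ∀ (l : List (List (String × Int))), Dom_resulting_dictionary l → Spec_resulting_dictionary l (resulting_dictionary l)

-- ===== LEMMAS AND PROOFS =====

-- the flattened stream of (key, value, dict-number) triples both phase-1 loops consume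
def pvFlat : List (List (String × Int)) → Int → List (String × Int × Int)
  | [], _ => []
  | d :: t, i => ((PySem.Dict.ofList d).items.map (fun kv => (kv.1, kv.2, i))) ++ pvFlat t (i + 1)

def pvStepA (md : PySem.Dict String (Int × Int × Int)) (x : String × Int × Int) :
    PySem.Dict String (Int × Int × Int) := pvInnerA x.2.2 md (x.1, x.2.1)

def pvStepB (occ : PySem.Dict String (List (Int × Int))) (x : String × Int × Int) :
    PySem.Dict String (List (Int × Int)) := occ.modify x.1 [] (· ++ [(x.2.1, x.2.2)])

-- running max (earliest on ties) of a nonempty occurrence list, and A's summary tuple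
def pvBest (p : Int × Int) (rest : List (Int × Int)) : Int × Int :=
  rest.foldl (fun b q => if b.1 < q.1 then q else b) p

def pvSumm : List (Int × Int) → Int × Int × Int
  | [] => (0, 0, 0)
  | p :: rest => ((rest.length + 1 : Nat), (pvBest p rest).1, (pvBest p rest).2)

-- the phase-1 invariant tying A's max_dict to B's occurrence dict
def pvGood (occ : PySem.Dict String (List (Int × Int))) (md : PySem.Dict String (Int × Int × Int)) : Prop :=
  md.items = occ.items.map (fun it => (it.1, pvSumm it.2)) ∧
  (∀ it ∈ occ.items, it.2 ≠ []) ∧ occ.keys.Nodup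

theorem pvFusionA (l : List (List (String × Int))) : ∀ (md : PySem.Dict String (Int × Int × Int)) (i : Int),
    (l.foldl (fun (st : PySem.Dict String (Int × Int × Int) × Int) d =>
      ((PySem.Dict.ofList d).items.foldl (pvInnerA st.2) st.1, st.2 + 1)) (md, i)).1
    = (pvFlat l i).foldl pvStepA md := by
  induction l with
  | nil => intro md i; rfl
  | cons d t ih =>
    intro md i
    simp only [List.foldl_cons, pvFlat, List.foldl_append, List.foldl_map]
    exact ih _ _

theorem pvFusionB (l : List (List (String × Int))) : ∀ (occ : PySem.Dict String (List (Int × Int))) (i : Int),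
    (PySem.List.enumerate l i).foldl
      (fun (occ : PySem.Dict String (List (Int × Int))) p =>
        (PySem.Dict.ofList p.2).items.foldl
          (fun occ kv => occ.modify kv.1 [] (· ++ [(kv.2, p.1)])) occ) occ
    = (pvFlat l i).foldl pvStepB occ := by
  induction l with
  | nil => intro occ i; rfl
  | cons d t ih =>
    intro occ i
    simp only [PySem.List.enumerate_cons, List.foldl_cons, pvFlat, List.foldl_append, List.foldl_map]
    exact ih _ _

theorem pvSumm_append (ps : List (Int × Int)) (v i : Int) (h : ps ≠ []) :
    pvSumm (ps ++ [(v, i)]) =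
      (if (pvSumm ps).2.1 < v then ((pvSumm ps).1 + 1, v, i)
       else ((pvSumm ps).1 + 1, (pvSumm ps).2.1, (pvSumm ps).2.2)) := by
  match ps with
  | p :: rest =>
    simp only [List.cons_append, pvSumm, pvBest, List.foldl_append, List.foldl_cons, List.foldl_nil,
      List.length_append, List.length_cons, List.length_nil]
    by_cases hlt : (rest.foldl (fun b q => if b.1 < q.1 then q else b) p).1 < v <;>
      simp [hlt]

theorem pvGood_step (occ : PySem.Dict String (List (Int × Int))) (md : PySem.Dict String (Int × Int × Int))
    (x : String × Int × Int) (h : pvGood occ md) : pvGood (pvStepB occ x) (pvStepA md x) := by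
  obtain ⟨hitems, hne, hnd⟩ := h
  obtain ⟨k, v, i⟩ := x
  have hkeys : md.keys = occ.keys := by
    simp only [PySem.Dict.keys, hitems, List.map_map]
    rfl
  have hmdnd : md.keys.Nodup := by rw [hkeys]; exact hnd
  have hcont : md.contains k = occ.contains k := by
    rw [PySem.Dict.contains_eq_decide_mem_keys, PySem.Dict.contains_eq_decide_mem_keys, hkeys]
  by_cases hc : occ.contains k = true
  · -- key already present: A overwrites its running tuple, B appends to the occurrence list
    obtain ⟨ps, hps⟩ : ∃ ps, occ.get? k = some ps := by
      have := PySem.Dict.contains_eq_isSome_get? (d := occ) (k := k)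
      rw [hc] at this
      exact Option.isSome_iff_exists.mp this.symm
    have hmem : (k, ps) ∈ occ.items := PySem.Dict.mem_items_of_get?_eq_some _ hps
    have hpsne : ps ≠ [] := hne _ hmem
    have hmdget : md.get? k = some (pvSumm ps) := by
      apply PySem.Dict.get?_of_mem_items _ _ hmdnd
      rw [hitems]
      exact List.mem_map_of_mem hmem
    have hmdc : md.contains k = true := by rw [hcont]; exact hc
    have hB : pvStepB occ (k, v, i) = occ.insert k (ps ++ [(v, i)]) := by
      simp only [pvStepB, PySem.Dict.modify, PySem.Dict.getD_eq_get?_getD, hps, Option.getD_some]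
    have hA : pvStepA md (k, v, i) =
        md.insert k (if (pvSumm ps).2.1 < v then ((pvSumm ps).1 + 1, v, i)
          else ((pvSumm ps).1 + 1, (pvSumm ps).2.1, (pvSumm ps).2.2)) := by
      simp only [pvStepA, pvInnerA, hmdget, PySem.Dict.get?_insert_self, Option.getD_some]
      by_cases hlt : (pvSumm ps).2.1 < v <;>
        simp [hlt, PySem.Dict.insert_insert_self]
    rw [hA, hB]
    refine ⟨?_, ?_, ?_⟩
    · rw [PySem.Dict.items_insert_of_contains _ _ hmdc, PySem.Dict.items_insert_of_contains _ _ hc,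
        hitems, List.map_map, List.map_map]
      apply List.map_congr_left
      intro it hit
      by_cases hk : it.1 = k
      · have : it.2 = ps := by
          have h1 : occ.get? k = some it.2 := by
            apply PySem.Dict.get?_of_mem_items _ _ hnd
            rw [← hk]
            exact hit
          rw [hps] at h1
          exact (Option.some.injEq _ _ ▸ h1).symm
        subst this
        simp only [Function.comp_apply, hk, beq_self_eq_true, if_pos]
        rw [pvSumm_append _ _ _ hpsne]
      · simp [Function.comp_apply, hk]
    · intro it hit
      rw [PySem.Dict.items_insert_of_contains _ _ hc] at hit
      obtain ⟨p, hp, hpe⟩ := List.mem_map.mp hit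
      by_cases hk : p.1 = k
      · simp only [hk, beq_self_eq_true, if_pos] at hpe
        rw [← hpe]
        simp [hpsne]
      · simp only [hk, not_false_eq_true, if_neg, beq_iff_eq] at hpe
        rw [← hpe]
        exact hne _ hp
    · rw [PySem.Dict.keys_insert_of_contains _ _ hc]
      exact hnd
  · -- fresh key: both dicts append a new entry
    have hc' : occ.contains k = false := by simpa using hc
    have hmdc : md.contains k = false := by rw [hcont]; exact hc'
    have hmdget : md.get? k = none := by
      rw [PySem.Dict.get?_eq_none_iff_contains]
      exact hmdc
    have hB : pvStepB occ (k, v, i) = occ.insert k [(v, i)] := by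
      simp only [pvStepB, PySem.Dict.modify, PySem.Dict.getD_of_not_contains _ [] hc', List.nil_append]
    have hA : pvStepA md (k, v, i) = md.insert k (1, v, i) := by
      simp only [pvStepA, pvInnerA, hmdget]
    rw [hA, hB]
    refine ⟨?_, ?_, ?_⟩
    · rw [PySem.Dict.items_insert_of_not_contains _ _ hmdc, PySem.Dict.items_insert_of_not_contains _ _ hc',
        hitems, List.map_append]
      rfl
    · intro it hit
      rw [PySem.Dict.items_insert_of_not_contains _ _ hc'] at hit
      rcases List.mem_append.mp hit with h1 | h1
      · exact hne _ h1
      · simp only [List.mem_singleton] at h1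
        rw [h1]
        simp
    · rw [PySem.Dict.keys_insert_of_not_contains _ _ hc']
      apply List.Nodup.append hnd (List.nodup_singleton k)
      intro a ha hb
      simp only [List.mem_singleton] at hb
      subst hb
      have := (PySem.Dict.contains_iff_mem_keys occ a).mpr ha
      rw [hc'] at this
      cases this

theorem pvGood_fold (s : List (String × Int × Int)) :
    pvGood (s.foldl pvStepB PySem.Dict.empty) (s.foldl pvStepA PySem.Dict.empty) := by
  have h : ∀ (occ : PySem.Dict String (List (Int × Int))) (md : PySem.Dict String (Int × Int × Int)),
      pvGood occ md → pvGood (s.foldl pvStepB occ) (s.foldl pvStepA md) := by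
    induction s with
    | nil => intro occ md h; exact h
    | cons x t ih => intro occ md h; exact ih _ _ (pvGood_step _ _ _ h)
  apply h
  refine ⟨rfl, ?_, ?_⟩ <;> simp [PySem.Dict.empty, PySem.Dict.keys]

theorem pvMaxCons (p : Int × Int) (rest : List (Int × Int)) :
    PySem.List.max? (p :: rest) (fun q => q.1) = some (pvBest p rest) := by
  show List.foldl _ (some p) rest = _
  induction rest generalizing p with
  | nil => rfl
  | cons q t ih =>
    simp only [List.foldl_cons, pvBest] at *
    by_cases h : p.1 < q.1 <;> simp [h, ih]

theorem pvPhase2 (occ : PySem.Dict String (List (Int × Int))) (md : PySem.Dict String (Int × Int × Int))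
    (h : pvGood occ md) :
    md.items.foldl pvResA PySem.Dict.empty = occ.items.foldl pvResB PySem.Dict.empty := by
  obtain ⟨hitems, hne, _⟩ := h
  rw [hitems, List.foldl_map]
  apply PySem.List.foldl_congr_mem
  intro r it hit
  obtain ⟨k, ps⟩ := it
  match ps, hne _ hit with
  | p :: rest, _ =>
    by_cases h1 : rest = []
    · subst h1
      simp [pvResA, pvResB, pvMaxCons, pvSumm, pvBest]
    · have hlen : rest.length ≠ 0 := by simpa using h1
      simp only [pvResA, pvResB, pvMaxCons, pvSumm]
      have c1 : (((rest.length + 1 : Nat) : Int) == 1) = false := by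
        simp only [beq_eq_false_iff_ne, ne_eq]
        omega
      have c2 : ((p :: rest).length == 1) = false := by
        simp only [List.length_cons, beq_eq_false_iff_ne, ne_eq]
        omega
      rw [c1, c2]

-- ===== VERDICT (by name: the statement is the Claim_ definition above) =====
theorem resulting_dictionary_spec : Claim_equal_resulting_dictionary := by
  intro l _
  show resulting_dictionary l = resulting_dictionary_alt l
  unfold resulting_dictionary resulting_dictionary_alt
  simp only [pvFusionA, pvFusionB]
  exact congrArg PySem.Dict.items (pvPhase2 _ _ (pvGood_fold (pvFlat l 1)))
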